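-- pv_equiv track=rewrite | github.com/jendrikseipp/scorpion | experiments/2025-04-10-closed_lists/binary_folding_min_max_report.py | binary_fold_total
-- ===== SOURCE A (Python) =====
-- def binary_fold_total(domains):
--     value = sum(domains)
--     domains = list(domains)
--     while len(domains) > 1:
--         new_domains = []
--         i = 0
--         while i + 1 < len(domains):
--             node_value = domains[i] * domains[i+1]
--             value += node_value
--             new_domains.append(node_value)
--             i += 2
--         if i < len(domains):
--             new_domains.append(domains[i])
--         domains = new_domains
--     return value
-- ===== SOURCE B (Python) =====
-- def binary_fold_total(domains):
--     def fold(level):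
--         if len(level) <= 1:
--             return 0
--         ps = [level[i] * level[i + 1] for i in range(0, len(level) - 1, 2)]
--         rest = [level[-1]] if len(level) % 2 else []
--         return sum(ps) + fold(ps + rest)
--     return sum(domains) + fold(list(domains))
-- ===== Notes on version B (the rewrite author's own statement) =====
-- stated objective: alternative
-- what changed: Replaces A's two nested destructive while-loops (index walk appending to a mutated new_domains and a running global value) by a pure recursion on levels whose pair products are built as a comprehension over a stepped range, with the odd leftover selected by a parity test on the length.
import Mathlib
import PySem

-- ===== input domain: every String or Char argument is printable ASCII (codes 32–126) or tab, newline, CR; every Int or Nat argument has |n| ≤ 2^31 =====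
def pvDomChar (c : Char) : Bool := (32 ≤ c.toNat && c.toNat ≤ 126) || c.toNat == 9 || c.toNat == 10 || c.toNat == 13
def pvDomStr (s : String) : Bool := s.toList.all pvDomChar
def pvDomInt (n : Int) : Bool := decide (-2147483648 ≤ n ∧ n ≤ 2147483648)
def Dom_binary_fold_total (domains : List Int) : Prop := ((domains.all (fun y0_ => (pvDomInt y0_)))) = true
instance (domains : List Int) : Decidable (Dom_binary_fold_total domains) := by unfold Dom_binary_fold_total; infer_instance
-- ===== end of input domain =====

-- B replaces A's destructive while-loops by a per-level comprehension over a stepped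
-- range plus recursion on levels (objective: alternative decomposition, same cost).
-- Both loop ports use a structural fuel argument purely as a totality guard;
-- fuel is always supplied large enough that the exhausted-fuel branch is unreachable.

-- ===== PORT A =====
-- inner 'while i + 1 < len(domains)' loop of A, threading (value, new_domains);
-- the guard keeps i (and i+1) in range, so List.getD is exactly Python's domains[i]
def pvInnerA (ds : List Int) (i : Nat) (value : Int) (nd : List Int) : Nat → Int × List Int
  | 0 => (value, nd)    -- fuel exhausted; unreachable for fuel ≥ ds.length - i
  | fuel + 1 =>
    if i + 1 < ds.length then
      let nv := ds.getD i 0 * ds.getD (i + 1) 0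
      pvInnerA ds (i + 2) (value + nv) (nd ++ [nv]) fuel
    else
      (value, if i < ds.length then nd ++ [ds.getD i 0] else nd)

-- outer 'while len(domains) > 1' loop of A
def pvOuterA (value : Int) (ds : List Int) : Nat → Int
  | 0 => value          -- fuel exhausted; unreachable for fuel ≥ ds.length
  | fuel + 1 =>
    if 1 < ds.length then
      let r := pvInnerA ds 0 value [] ds.length
      pvOuterA r.1 r.2 fuel
    else value

def binary_fold_total (domains : List Int) : Int :=
  pvOuterA domains.sum domains domains.length

-- ===== PORT B =====
-- [level[i] * level[i+1] for i in range(0, len(level) - 1, 2)]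
def pvPairProds (level : List Int) : List Int :=
  (PySem.List.pyRange 0 ((level.length : Int) - 1) 2).map
    (fun i => (PySem.List.pyGet? level i).getD 0 * (PySem.List.pyGet? level (i + 1)).getD 0)

-- recursive 'fold(level)' of B
def pvFoldB (level : List Int) : Nat → Int
  | 0 => 0              -- fuel exhausted; unreachable for fuel ≥ level.length
  | fuel + 1 =>
    if level.length ≤ 1 then 0
    else
      let ps := pvPairProds level
      let rest := if level.length % 2 = 1 then [(PySem.List.pyGet? level (-1)).getD 0] else []
      ps.sum + pvFoldB (ps ++ rest) fuel

def binary_fold_total_alt (domains : List Int) : Int :=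
  domains.sum + pvFoldB domains domains.length

-- ===== PRECONDITION & SPEC =====
def Spec_binary_fold_total (domains : List Int) (out : Int) : Prop := out = binary_fold_total_alt domains
instance (domains : List Int) (out : Int) : Decidable (Spec_binary_fold_total domains out) := by unfold Spec_binary_fold_total; infer_instance

-- ===== CLAIM (what is proved, stated in full; the proofs are below) =====
def Claim_equal_binary_fold_total : Prop := ∀ (domains : List Int), Dom_binary_fold_total domains → Spec_binary_fold_total domains (binary_fold_total domains)

-- ===== LEMMAS AND PROOFS =====

-- proof-side view of one pairing pass: the pair products and the odd leftover
def pvPairsRec : List Int → List Int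
  | a :: b :: t => a * b :: pvPairsRec t
  | _ => []

def pvOddTail (l : List Int) : List Int :=
  if l.length % 2 = 1 then [l.getLast?.getD 0] else []

theorem pvOddTail_cons2 (a b : Int) (t : List Int) :
    pvOddTail (a :: b :: t) = pvOddTail t := by
  unfold pvOddTail
  rcases t with _ | ⟨c, t⟩
  · simp
  · simp only [List.length_cons, List.getLast?_cons_cons]
    have h : (t.length + 1 + 1 + 1) % 2 = (t.length + 1) % 2 := by omega
    rw [h]
    rfl

theorem pvRest_eq (l : List Int) :
    (if l.length % 2 = 1 then [(PySem.List.pyGet? l (-1)).getD 0] else []) = pvOddTail l := by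
  unfold pvOddTail
  rw [PySem.List.pyGet?_neg_one]

theorem pvPairsRec_length (l : List Int) : (pvPairsRec l).length = l.length / 2 := by
  induction l using pvPairsRec.induct with
  | case1 a b t ih => simp [pvPairsRec, ih]; omega
  | case2 l h =>
    rcases l with _ | ⟨a, _ | ⟨b, t⟩⟩
    · simp [pvPairsRec]
    · simp [pvPairsRec]
    · exact absurd rfl (h a b t)

theorem pvOddTail_length (l : List Int) : (pvOddTail l).length = l.length % 2 := by
  unfold pvOddTail
  split <;> simp <;> omega

theorem pvPairProds_closed (l : List Int) :
    pvPairProds l = (List.range (l.length / 2)).map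
      (fun k => l.getD (2 * k) 0 * l.getD (2 * k + 1) 0) := by
  unfold pvPairProds PySem.List.pyRange
  norm_num [List.map_map]
  have hc : (if 1 < l.length then (((l.length : Int) - 1 + 2 - 1) / 2).toNat else 0)
      = l.length / 2 := by split <;> omega
  rw [hc]
  refine List.map_congr_left ?_
  intro k hk
  simp only [Function.comp]
  have h1 : (2 : Int) * (k : Int) = ((2 * k : Nat) : Int) := by push_cast; ring
  have h2 : (2 : Int) * (k : Int) + 1 = ((2 * k + 1 : Nat) : Int) := by push_cast; ring
  rw [h1] at *
  rw [h2, PySem.List.pyGet?_natCast, PySem.List.pyGet?_natCast]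

theorem pvPairProds_eq (l : List Int) : pvPairProds l = pvPairsRec l := by
  induction l using pvPairsRec.induct with
  | case1 a b t ih =>
    rw [pvPairProds_closed] at *
    have hlen : (a :: b :: t).length / 2 = t.length / 2 + 1 := by simp; omega
    rw [hlen, List.range_succ_eq_map, List.map_cons, List.map_map]
    simp only [pvPairsRec]
    congr 1
  | case2 l h =>
    rw [pvPairProds_closed]
    rcases l with _ | ⟨a, _ | ⟨b, t⟩⟩
    · simp [pvPairsRec]
    · simp [pvPairsRec]
    · exact absurd rfl (h a b t)

theorem pvInnerA_eq (ds : List Int) (fuel i : Nat) (value : Int) (nd : List Int)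
    (hf : ds.length ≤ i + fuel) :
    pvInnerA ds i value nd fuel =
      (value + (pvPairsRec (ds.drop i)).sum,
       nd ++ pvPairsRec (ds.drop i) ++ pvOddTail (ds.drop i)) := by
  induction fuel generalizing i value nd with
  | zero =>
    have hd : ds.drop i = [] := List.drop_eq_nil_iff.mpr (by omega)
    simp [pvInnerA, hd, pvPairsRec, pvOddTail]
  | succ fuel ih =>
    rw [pvInnerA]
    by_cases h : i + 1 < ds.length
    · rw [if_pos h]
      have hi : i < ds.length := by omega
      have hd : ds.drop i = ds[i] :: ds[i+1] :: ds.drop (i+2) := by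
        rw [List.drop_eq_getElem_cons hi, List.drop_eq_getElem_cons h]
      rw [ih (i + 2) _ _ (by omega), hd]
      simp only [pvPairsRec, pvOddTail_cons2, List.sum_cons]
      have hnv : ds.getD i 0 * ds.getD (i + 1) 0 = ds[i] * ds[i+1] := by
        simp [List.getD_eq_getElem?_getD, List.getElem?_eq_getElem hi, List.getElem?_eq_getElem h]
      rw [hnv]
      simp [add_assoc]
    · rw [if_neg h]
      by_cases hi : i < ds.length
      · have hd : ds.drop i = [ds[i]] := by
          have h0 : List.drop (i + 1) ds = [] := List.drop_eq_nil_iff.mpr (by omega)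
          rw [List.drop_eq_getElem_cons hi, h0]
        rw [if_pos hi, hd]
        simp [pvPairsRec, pvOddTail, List.getD_eq_getElem?_getD, List.getElem?_eq_getElem hi]
      · have hd : ds.drop i = [] := List.drop_eq_nil_iff.mpr (by omega)
        rw [if_neg hi, hd]
        simp [pvPairsRec, pvOddTail]

theorem pvOuterA_eq (fuel : Nat) (value : Int) (ds : List Int) (hf : ds.length ≤ fuel) :
    pvOuterA value ds fuel = value + pvFoldB ds fuel := by
  induction fuel generalizing value ds with
  | zero => simp [pvOuterA, pvFoldB]
  | succ fuel ih =>
    rw [pvOuterA, pvFoldB]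
    by_cases h : 1 < ds.length
    · rw [if_pos h, if_neg (by omega)]
      have hr : pvInnerA ds 0 value [] ds.length
          = (value + (pvPairsRec ds).sum, pvPairsRec ds ++ pvOddTail ds) := by
        simpa using pvInnerA_eq ds ds.length 0 value [] (by omega)
      rw [hr]
      simp only [pvPairProds_eq, pvRest_eq]
      have hlen : (pvPairsRec ds ++ pvOddTail ds).length ≤ fuel := by
        rw [List.length_append, pvPairsRec_length, pvOddTail_length]
        omega
      rw [ih _ _ hlen]
      ring
    · rw [if_neg h, if_pos (by omega)]
      ring

-- ===== VERDICT (by name: the statement is the Claim_ definition above) =====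
theorem binary_fold_total_spec : Claim_equal_binary_fold_total := by
  intro domains _
  unfold Spec_binary_fold_total binary_fold_total binary_fold_total_alt
  exact pvOuterA_eq domains.length domains.sum domains le_rfl
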